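-- pv_equiv track=rewrite | github.com/davidroblesj/other-projects | wff-to-cnf/programa_version_final_3.py | impl_free
-- ===== SOURCE A (Python) =====
-- def nodo_raiz(formula):
--     contador = 0
--     for i in range(0, len(formula)):
--         if formula[i] == '(':
--             contador = contador + 1
--         if formula[i] == ')':
--             contador = contador - 1
--         if contador == 1 and (formula[i] == '|' or formula[i] == '&' or formula[i] == '>' or formula[i] == '~'):
--             break
--     return i
--
-- def impl_free(fbf):
--     if len(fbf) < 5:
--         fwi = fbf
--     elif fbf[nodo_raiz(fbf)] == '>':
--         fwi = ('((~' + impl_free(segment(fbf, nodo_raiz(fbf))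
--                                  [0]) + ')|' + impl_free(segment(fbf, nodo_raiz(fbf))[1]) + ')')
--     elif fbf[nodo_raiz(fbf)] == '&':
--         fwi = ('(' + impl_free(segment(fbf, nodo_raiz(fbf))
--                                [0]) + '&' + impl_free(segment(fbf, nodo_raiz(fbf))[1]) + ')')
--     elif fbf[nodo_raiz(fbf)] == '|':
--         fwi = ('(' + impl_free(segment(fbf, nodo_raiz(fbf))
--                                [0]) + '|' + impl_free(segment(fbf, nodo_raiz(fbf))[1]) + ')')
--     elif fbf[nodo_raiz(fbf)] == '~':
--         fwi = ('(~' + impl_free(segment(fbf, nodo_raiz(fbf))[1])+')')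
--     else:
--         fwi = fbf
--     return fwi
--
-- def segment(fbf, indice):
--     if len(fbf) < 5:
--         return fbf
--     else:
--         nfbf = [fbf[1:indice], fbf[indice+1:-1]]
--         return nfbf
-- ===== SOURCE B (Python) =====
-- # B: two-phase — parse the formula into a tree once (single fused scan+split per node),
-- # then render the tree with '>' rewritten; A instead rescans via nodo_raiz/segment at every branch.
-- def _parse(s):
--     n = len(s)
--     if n < 5:
--         return ('atom', s)
--     depth = 0
--     root = n - 1
--     for i, c in enumerate(s):
--         if c == '(':
--             depth += 1
--         elif c == ')':
--             depth -= 1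
--         if depth == 1 and c in '|&>~':
--             root = i
--             break
--     op = s[root]
--     if op not in '|&>~':
--         return ('atom', s)
--     right = s[root + 1:n - 1]
--     if op == '~':
--         return ('~', _parse(right))
--     return (op, _parse(s[1:root]), _parse(right))
--
-- def _render(t):
--     k = t[0]
--     if k == 'atom':
--         return t[1]
--     if k == '~':
--         return '(~' + _render(t[1]) + ')'
--     if k == '>':
--         return '((~' + _render(t[1]) + ')|' + _render(t[2]) + ')'
--     return '(' + _render(t[1]) + k + _render(t[2]) + ')'
--
-- def impl_free(fbf):
--     return _render(_parse(fbf))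
-- ===== Notes on version B (the rewrite author's own statement) =====
-- stated objective: faster
-- what changed: B parses the formula once into an explicit tree (one fused scan+split per node) and then renders it with '>' rewritten, instead of A's recursion that re-runs nodo_raiz up to five times and segment twice at every node.
import Mathlib
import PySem

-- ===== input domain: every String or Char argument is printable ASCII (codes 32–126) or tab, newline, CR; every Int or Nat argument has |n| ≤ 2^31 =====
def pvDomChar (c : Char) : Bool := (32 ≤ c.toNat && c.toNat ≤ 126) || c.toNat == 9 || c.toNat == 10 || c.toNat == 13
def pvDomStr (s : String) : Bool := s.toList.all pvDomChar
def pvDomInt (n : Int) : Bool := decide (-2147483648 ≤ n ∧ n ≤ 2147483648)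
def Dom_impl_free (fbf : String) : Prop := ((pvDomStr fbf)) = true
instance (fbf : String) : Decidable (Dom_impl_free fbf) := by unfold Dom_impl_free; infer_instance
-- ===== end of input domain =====

-- B replaces A's rescan-per-branch recursion (nodo_raiz/segment recomputed at every branch) by one
-- parse into a tree followed by a rendering pass; same return value, constant-factor speed-up.

-- ===== PORT A =====

-- nodo_raiz: Python's `for i in range(len(formula))` with a break; the `i - 1` (Nat) in the nil case
-- is the leftover loop variable len-1 (impl_free only calls this for len ≥ 5, so the loop always runs,
-- and the returned index is always < len, so indexing fbf[i] below never raises — getD's default is dead).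
def nodoRaizAux : List Char → Int → Nat → Nat
  | [], _, i => i - 1
  | c :: rest, contador, i =>
    let contador := if c = '(' then contador + 1 else contador
    let contador := if c = ')' then contador - 1 else contador
    if contador = 1 ∧ (c = '|' ∨ c = '&' ∨ c = '>' ∨ c = '~') then i
    else nodoRaizAux rest contador (i + 1)

def nodoRaizL (formula : List Char) : Nat := nodoRaizAux formula 0 0

-- segment: Python returns [fbf[1:indice], fbf[indice+1:-1]]; the len<5 branch (Python returns the
-- string itself) is unreachable from impl_free, which handles len<5 before ever calling segment.
def segmentL (fbf : List Char) (indice : Nat) : List Char × List Char :=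
  if fbf.length < 5 then (fbf, fbf)
  else (PySem.List.slice fbf (some 1) (some (indice : Int)),
        PySem.List.slice fbf (some ((indice : Int) + 1)) (some (-1)))

theorem seg1_len_lt (l : List Char) (i : Nat) (h : ¬ l.length < 5) :
    (PySem.List.slice l (some 1) (some (i : Int))).length < l.length := by
  simp [PySem.List.slice, PySem.List.clampIdx]; omega

theorem seg2_len_lt (l : List Char) (i : Nat) (h : ¬ l.length < 5) :
    (PySem.List.slice l (some ((i : Int) + 1)) (some (-1))).length < l.length := by
  have h0 : ¬ ((l.length : Int) + -1 < 0) := by omega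
  simp [PySem.List.slice, PySem.List.clampIdx, h0]; omega

def implFreeL (fbf : List Char) : List Char :=
  if fbf.length < 5 then fbf
  else if fbf.getD (nodoRaizL fbf) ' ' = '>' then
    '(' :: '(' :: '~' :: implFreeL (segmentL fbf (nodoRaizL fbf)).1 ++
      ')' :: '|' :: implFreeL (segmentL fbf (nodoRaizL fbf)).2 ++ [')']
  else if fbf.getD (nodoRaizL fbf) ' ' = '&' then
    '(' :: implFreeL (segmentL fbf (nodoRaizL fbf)).1 ++
      '&' :: implFreeL (segmentL fbf (nodoRaizL fbf)).2 ++ [')']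
  else if fbf.getD (nodoRaizL fbf) ' ' = '|' then
    '(' :: implFreeL (segmentL fbf (nodoRaizL fbf)).1 ++
      '|' :: implFreeL (segmentL fbf (nodoRaizL fbf)).2 ++ [')']
  else if fbf.getD (nodoRaizL fbf) ' ' = '~' then
    '(' :: '~' :: implFreeL (segmentL fbf (nodoRaizL fbf)).2 ++ [')']
  else fbf
termination_by fbf.length
decreasing_by
  all_goals
    (have h : ¬ fbf.length < 5 := by assumption
     simp only [segmentL, if_neg h]
     first
       | exact seg1_len_lt _ _ h
       | exact seg2_len_lt _ _ h)

def impl_free (fbf : String) : String := String.ofList (implFreeL fbf.toList)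

-- ===== PORT B =====

inductive PForm where
  | atom : List Char → PForm
  | neg : PForm → PForm
  | bin : Char → PForm → PForm → PForm

-- B's single fused scan (depth updated with if/elif, default root = n-1 via the nil case's i - 1).
def findRootAux : List Char → Int → Nat → Nat
  | [], _, i => i - 1
  | c :: rest, depth, i =>
    let depth := if c = '(' then depth + 1 else if c = ')' then depth - 1 else depth
    if depth = 1 ∧ (c = '|' ∨ c = '&' ∨ c = '>' ∨ c = '~') then i
    else findRootAux rest depth (i + 1)

-- s[1:root] and s[root+1:n-1] have nonnegative bounds: exactly Lean's clamped drop/take.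
def parseF (s : List Char) : PForm :=
  if s.length < 5 then .atom s
  else
    let root := findRootAux s 0 0
    let op := s.getD root ' '
    if op = '|' ∨ op = '&' ∨ op = '>' ∨ op = '~' then
      if op = '~' then .neg (parseF ((s.drop (root + 1)).take (s.length - 1 - (root + 1))))
      else .bin op (parseF ((s.drop 1).take (root - 1)))
                   (parseF ((s.drop (root + 1)).take (s.length - 1 - (root + 1))))
    else .atom s
termination_by s.length
decreasing_by
  all_goals simp only [List.length_take, List.length_drop]; omega

def renderF : PForm → List Char
  | .atom s => s
  | .neg t => '(' :: '~' :: renderF t ++ [')']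
  | .bin op a b =>
    if op = '>' then '(' :: '(' :: '~' :: renderF a ++ ')' :: '|' :: renderF b ++ [')']
    else '(' :: renderF a ++ op :: renderF b ++ [')']

def impl_free_alt (fbf : String) : String := String.ofList (renderF (parseF fbf.toList))

-- ===== PRECONDITION & SPEC =====
def Spec_impl_free (fbf : String) (out : String) : Prop := out = impl_free_alt fbf
instance (fbf : String) (out : String) : Decidable (Spec_impl_free fbf out) := by unfold Spec_impl_free; infer_instance

-- ===== CLAIM (what is proved, stated in full; the proofs are below) =====
def Claim_equal_impl_free : Prop := ∀ (fbf : String), Dom_impl_free fbf → Spec_impl_free fbf (impl_free fbf)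

-- ===== LEMMAS AND PROOFS =====

-- B's elif depth update computes A's two-step contador, so the two scans return the same index.
theorem findRootAux_eq (l : List Char) : ∀ (d : Int) (i : Nat), findRootAux l d i = nodoRaizAux l d i := by
  induction l with
  | nil => intro d i; rfl
  | cons c rest ih =>
    intro d i
    have hd : (if c = '(' then d + 1 else if c = ')' then d - 1 else d)
        = (if c = ')' then (if c = '(' then d + 1 else d) - 1 else (if c = '(' then d + 1 else d)) := by
      by_cases h1 : c = '('
      · subst h1; simp
      · by_cases h2 : c = ')' <;> simp [h1, h2]
    simp only [findRootAux, nodoRaizAux, hd]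
    by_cases hc : (if c = ')' then (if c = '(' then d + 1 else d) - 1 else (if c = '(' then d + 1 else d)) = 1
        ∧ (c = '|' ∨ c = '&' ∨ c = '>' ∨ c = '~')
    · rw [if_pos hc, if_pos hc]
    · rw [if_neg hc, if_neg hc]; exact ih _ _

theorem seg1_eq (l : List Char) (i : Nat) :
    PySem.List.slice l (some 1) (some (i : Int)) = (l.drop 1).take (i - 1) := by
  have h1 : (1 : Int) = ((1 : Nat) : Int) := by norm_num
  rw [h1, PySem.List.slice_natCast]

theorem seg2_eq (l : List Char) (i : Nat) (hl : l ≠ []) :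
    PySem.List.slice l (some ((i : Int) + 1)) (some (-1))
      = (l.drop (i + 1)).take (l.length - 1 - (i + 1)) := by
  have hlen : 1 ≤ l.length := List.length_pos_of_ne_nil hl
  simp only [PySem.List.slice, PySem.List.clampIdx]
  rw [if_neg (by omega : ¬ ((i : Int) + 1 < 0)),
      if_pos (by norm_num : (-1 : Int) < 0),
      if_neg (by omega : ¬ ((l.length : Int) + -1 < 0))]
  have ht : ((i : Int) + 1).toNat = i + 1 := by omega
  rw [ht]
  by_cases hi : i + 1 ≤ l.length
  · rw [min_eq_left hi]
    congr 1
    omega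
  · rw [min_eq_right (by omega : l.length ≤ i + 1), List.drop_length,
        List.drop_eq_nil_of_le (by omega : l.length ≤ i + 1)]
    simp

theorem implFreeL_eq_render_parse (n : Nat) :
    ∀ (l : List Char), l.length ≤ n → implFreeL l = renderF (parseF l) := by
  induction n with
  | zero =>
    intro l h
    have : l = [] := List.length_eq_zero_iff.mp (Nat.le_zero.mp h)
    subst this
    rw [implFreeL, parseF]
    simp [renderF]
  | succ n ih =>
    intro l hlen
    by_cases h5 : l.length < 5
    · rw [implFreeL, parseF]; simp [h5, renderF]
    · have hnil : l ≠ [] := by intro h; rw [h] at h5; simp at h5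
      have hroot : findRootAux l 0 0 = nodoRaizL l := findRootAux_eq l 0 0
      have hseg1 : (segmentL l (nodoRaizL l)).1 = (l.drop 1).take (nodoRaizL l - 1) := by
        simp [segmentL, if_neg h5, seg1_eq]
      have hseg2 : (segmentL l (nodoRaizL l)).2
          = (l.drop (nodoRaizL l + 1)).take (l.length - 1 - (nodoRaizL l + 1)) := by
        simp [segmentL, if_neg h5, seg2_eq l (nodoRaizL l) hnil]
      have ih1 : implFreeL ((l.drop 1).take (nodoRaizL l - 1))
          = renderF (parseF ((l.drop 1).take (nodoRaizL l - 1))) := by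
        apply ih
        simp only [List.length_take, List.length_drop]
        omega
      have ih2 : implFreeL ((l.drop (nodoRaizL l + 1)).take (l.length - 1 - (nodoRaizL l + 1)))
          = renderF (parseF ((l.drop (nodoRaizL l + 1)).take (l.length - 1 - (nodoRaizL l + 1)))) := by
        apply ih
        simp only [List.length_take, List.length_drop]
        omega
      simp only [List.drop_one] at hseg1 hseg2 ih1 ih2
      rw [implFreeL, parseF]
      simp only [if_neg h5, hroot]
      by_cases hgt : l[nodoRaizL l]?.getD ' ' = '>'
      · simp [hgt, hseg1, hseg2, ih1, ih2, renderF]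
      · by_cases hand : l[nodoRaizL l]?.getD ' ' = '&'
        · simp [hand, hseg1, hseg2, ih1, ih2, renderF]
        · by_cases hor : l[nodoRaizL l]?.getD ' ' = '|'
          · simp [hor, hseg1, hseg2, ih1, ih2, renderF]
          · by_cases hneg : l[nodoRaizL l]?.getD ' ' = '~'
            · simp [hneg, hseg2, ih2, renderF]
            · simp [hgt, hand, hor, hneg, renderF]

-- ===== VERDICT (by name: the statement is the Claim_ definition above) =====
theorem impl_free_spec : Claim_equal_impl_free := by
  intro fbf _
  unfold Spec_impl_free impl_free impl_free_alt
  rw [implFreeL_eq_render_parse fbf.toList.length fbf.toList le_rfl]
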